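-- pv_equiv track=rewrite | github.com/Lcram33/compared_copy | other/rename_file_to_ntfs_format.py | check_filename_ok_for_ntfs
-- ===== SOURCE A (Python) =====
-- def check_filename_ok_for_ntfs(filename):
--     if filename.startswith(' ') or filename.endswith(' ') or filename.endswith('.'):
--         return False
--
--     disallowed = u"\u0000\\:*?\"<>|"
--     for dis in disallowed:
--         if dis in filename:
--             return False
--
--     return True
-- ===== SOURCE B (Python) =====
-- def check_filename_ok_for_ntfs(filename):
--     # Single left-to-right pass: each character is checked once, positional
--     # rules (no leading space, no trailing space/dot) are applied by index.
--     n = len(filename)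
--     for i, ch in enumerate(filename):
--         if ch in "\x00\\:*?\"<>|":
--             return False
--         if i == 0 and ch == ' ':
--             return False
--         if i == n - 1 and (ch == ' ' or ch == '.'):
--             return False
--     return True
-- ===== Notes on version B (the rewrite author's own statement) =====
-- stated objective: alternative
-- what changed: A does three prefix/suffix guards then nine substring scans over the filename; B makes one indexed pass over the characters, rejecting on a disallowed character or on a positional violation (leading space, trailing space or dot) as it goes.
import Mathlib
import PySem

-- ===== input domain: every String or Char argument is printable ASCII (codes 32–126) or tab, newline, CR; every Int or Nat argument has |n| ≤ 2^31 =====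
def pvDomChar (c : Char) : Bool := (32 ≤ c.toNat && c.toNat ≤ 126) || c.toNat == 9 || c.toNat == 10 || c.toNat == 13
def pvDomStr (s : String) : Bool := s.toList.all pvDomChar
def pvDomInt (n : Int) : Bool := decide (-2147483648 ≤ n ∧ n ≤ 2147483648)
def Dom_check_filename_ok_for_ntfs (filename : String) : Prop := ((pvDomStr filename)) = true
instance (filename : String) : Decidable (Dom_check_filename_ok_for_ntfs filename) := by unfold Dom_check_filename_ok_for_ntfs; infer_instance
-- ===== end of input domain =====

-- B replaces A's three guards + nine-substring-scan loop with a single indexed pass over the characters (alternative decomposition; same cost class).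

-- ===== PORT A =====
-- the 'for dis in disallowed: if dis in filename: return False' loop, step for step
def pvLoopA (filename : String) : List Char → Bool
  | [] => true
  | c :: rest =>
      if PySem.Str.isIn (String.ofList [c]) filename then false else pvLoopA filename rest

def check_filename_ok_for_ntfs (filename : String) : Bool :=
  if PySem.Str.startswith filename " " || PySem.Str.endswith filename " " ||
      PySem.Str.endswith filename "." then
    false
  else
    pvLoopA filename ("\x00\\:*?\"<>|".toList)

-- ===== PORT B =====
-- the 'for i, ch in enumerate(filename)' pass of Source B: index i carried through the recursion, n = len(filename)
def pvScanB (n : Nat) : Nat → List Char → Bool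
  | _, [] => true
  | i, c :: rest =>
      if c ∈ "\x00\\:*?\"<>|".toList then false
      else if i = 0 ∧ c = ' ' then false
      else if i = n - 1 ∧ (c = ' ' ∨ c = '.') then false
      else pvScanB n (i + 1) rest

def check_filename_ok_for_ntfs_alt (filename : String) : Bool :=
  pvScanB filename.toList.length 0 filename.toList

-- ===== PRECONDITION & SPEC =====
def Spec_check_filename_ok_for_ntfs (filename : String) (out : Bool) : Prop := out = check_filename_ok_for_ntfs_alt filename
instance (filename : String) (out : Bool) : Decidable (Spec_check_filename_ok_for_ntfs filename out) := by unfold Spec_check_filename_ok_for_ntfs; infer_instance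

-- ===== CLAIM (what is proved, stated in full; the proofs are below) =====
def Claim_equal_check_filename_ok_for_ntfs : Prop := ∀ (filename : String), Dom_check_filename_ok_for_ntfs filename → Spec_check_filename_ok_for_ntfs filename (check_filename_ok_for_ntfs filename)

-- ===== LEMMAS AND PROOFS =====

-- a one-character string is a substring iff the character occurs
theorem singleton_infix_iff_mem {c : Char} {l : List Char} : [c] <:+: l ↔ c ∈ l := by
  constructor
  · intro h
    exact (List.singleton_sublist).mp h.sublist
  · intro h
    obtain ⟨s, t, rfl⟩ := List.append_of_mem h
    exact ⟨s, t, by simp⟩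

theorem loopA_eq_true_iff (filename : String) (l : List Char) :
    pvLoopA filename l = true ↔ ∀ c ∈ l, c ∉ filename.toList := by
  induction l with
  | nil => simp [pvLoopA]
  | cons c rest ih =>
    simp only [pvLoopA]
    by_cases h : PySem.Str.isIn (String.ofList [c]) filename = true
    · have hc : c ∈ filename.toList := by
        have := (PySem.Chars.isIn_iff_infix (String.ofList [c]).toList filename.toList).mp
          (by simpa using h)
        simpa [singleton_infix_iff_mem] using this
      rw [if_pos h]
      simp only [Bool.false_eq_true, false_iff]
      intro hall
      exact hall c (List.mem_cons_self ..) hc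
    · have hc : c ∉ filename.toList := by
        intro hmem
        apply h
        simp only [PySem.Str.isIn_eq]
        exact (PySem.Chars.isIn_iff_infix _ _).mpr (by simpa [String.toList_ofList] using singleton_infix_iff_mem.mpr hmem)
      rw [if_neg h, ih]
      simp [hc]

-- characterisation of B's scan under the loop invariant i + |l| = n
theorem scanB_iff (n : Nat) (l : List Char) (i : Nat) (h : i + l.length = n) :
    pvScanB n i l = true ↔
      ((∀ c ∈ l, c ∉ "\x00\\:*?\"<>|".toList) ∧
       (i = 0 → l.head? ≠ some ' ') ∧
       (l.getLast? ≠ some ' ' ∧ l.getLast? ≠ some '.')) := by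
  induction l generalizing i with
  | nil => simp [pvScanB]
  | cons c rest ih =>
    simp only [pvScanB]
    by_cases h1 : c ∈ "\x00\\:*?\"<>|".toList
    · simp only [if_pos h1, Bool.false_eq_true, false_iff]
      intro ⟨hall, _, _⟩
      exact (hall c (List.mem_cons_self ..)) h1
    · rw [if_neg h1]
      by_cases h2 : i = 0 ∧ c = ' '
      · simp only [if_pos h2, Bool.false_eq_true, false_iff]
        intro ⟨_, hhead, _⟩
        exact hhead h2.1 (by simp [h2.2])
      · rw [if_neg h2]
        by_cases h3 : i = n - 1 ∧ (c = ' ' ∨ c = '.')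
        · -- last position: rest must be empty
          have hrest : rest = [] := by
            have : rest.length = 0 := by
              simp only [List.length_cons] at h
              omega
            exact List.eq_nil_of_length_eq_zero this
          subst hrest
          simp only [if_pos h3, Bool.false_eq_true, false_iff]
          intro ⟨_, _, hl1, hl2⟩
          rcases h3.2 with hc | hc
          · exact hl1 (by simp [hc])
          · exact hl2 (by simp [hc])
        · rw [if_neg h3]
          have hh : i + 1 + rest.length = n := by
            simp only [List.length_cons] at h; omega
          rw [ih (i + 1) hh]
          cases rest with
          | nil =>
            -- then c is the last character; i = n - 1, so h3's failure gives c ∉ {' ', '.'}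
            have hi : i = n - 1 := by simp at hh; omega
            have hc : ¬ (c = ' ' ∨ c = '.') := fun hcc => h3 ⟨hi, hcc⟩
            push Not at hc
            constructor
            · intro _
              refine ⟨by simpa using h1, ?_, by simp [hc.1], by simp [hc.2]⟩
              intro hi0
              simp only [List.head?_cons, ne_eq, Option.some.injEq]
              intro hc'
              exact h2 ⟨hi0, hc'⟩
            · intro _; simp
          | cons d ds =>
            simp only [List.mem_cons, List.head?_cons, List.getLast?_cons_cons]
            constructor
            · intro ⟨hall, _, hl⟩
              refine ⟨?_, ?_, hl⟩
              · intro x hx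
                rcases hx with rfl | hx
                · exact h1
                · exact hall x hx
              · intro hi0
                simp only [ne_eq, Option.some.injEq]
                intro hc'
                exact h2 ⟨hi0, hc'⟩
            · intro ⟨hall, _, hl⟩
              exact ⟨fun x hx => hall x (Or.inr hx), by omega, hl⟩

theorem startswith_char_iff (s : String) (c : Char) :
    PySem.Str.startswith s (String.ofList [c]) = true ↔ s.toList.head? = some c := by
  rw [PySem.Str.startswith_eq, PySem.Chars.startswith_iff]
  cases hs : s.toList with
  | nil => simp [String.toList_ofList, List.prefix_nil]
  | cons a t =>
    simp only [String.toList_ofList, List.head?_cons, Option.some.injEq]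
    constructor
    · intro ⟨t', ht⟩
      simp only [List.cons_append, List.nil_append, List.cons.injEq] at ht
      exact ht.1.symm
    · intro h; subst h; exact ⟨t, rfl⟩

theorem endswith_char_iff (s : String) (c : Char) :
    PySem.Str.endswith s (String.ofList [c]) = true ↔ s.toList.getLast? = some c := by
  rw [PySem.Str.endswith_eq, PySem.Chars.endswith_iff]
  simp only [String.toList_ofList]
  constructor
  · intro ⟨t, ht⟩
    rw [← ht]
    simp
  · intro h
    obtain ⟨l', hl⟩ := List.getLast?_eq_some_iff.mp h
    exact ⟨l', hl.symm⟩

-- ===== VERDICT (by name: the statement is the Claim_ definition above) =====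
theorem check_filename_ok_for_ntfs_spec : Claim_equal_check_filename_ok_for_ntfs := by
  intro filename _
  unfold Spec_check_filename_ok_for_ntfs check_filename_ok_for_ntfs check_filename_ok_for_ntfs_alt
  rw [Bool.eq_iff_iff]
  rw [scanB_iff _ _ 0 (by simp)]
  have hsw : (PySem.Str.startswith filename " " = true) ↔ filename.toList.head? = some ' ' :=
    startswith_char_iff filename ' '
  have hew1 : (PySem.Str.endswith filename " " = true) ↔ filename.toList.getLast? = some ' ' :=
    endswith_char_iff filename ' '
  have hew2 : (PySem.Str.endswith filename "." = true) ↔ filename.toList.getLast? = some '.' :=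
    endswith_char_iff filename '.'
  split
  · rename_i hguard
    simp only [Bool.or_eq_true] at hguard
    simp only [Bool.false_eq_true, false_iff]
    intro ⟨_, hhead, hl1, hl2⟩
    rcases hguard with (h | h) | h
    · exact hhead (by simp) (hsw.mp h)
    · exact hl1 (hew1.mp h)
    · exact hl2 (hew2.mp h)
  · rename_i hguard
    simp only [Bool.or_eq_true, not_or] at hguard
    obtain ⟨⟨g1, g2⟩, g3⟩ := hguard
    rw [loopA_eq_true_iff]
    constructor
    · intro h
      refine ⟨fun c hc hbad => h c hbad hc, fun _ => fun he => g1 (hsw.mpr he), fun he => g2 (hew1.mpr he), fun he => g3 (hew2.mpr he)⟩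
    · intro ⟨hall, _, _⟩ c hc hmem
      exact hall c hmem hc
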